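-- pv_equiv track=rewrite | github.com/looopTools/advent_of_Code_2023 | python/4/main.py | find_winning_numbers_weight
-- ===== SOURCE A (Python) =====
-- def find_winning_numbers_weight(winner_numbers: list[int], draw: list[int]) -> int:
--     result = 0
--
--     for num in draw:
--         if num in winner_numbers:
--             if result == 0:
--                 result = 1
--             else:
--                 result = result * 2
--
--     return result
-- ===== SOURCE B (Python) =====
-- def find_winning_numbers_weight(winner_numbers: list[int], draw: list[int]) -> int:
--     count = sum(1 for num in draw if num in winner_numbers)
--     return 2 ** (count - 1) if count else 0
-- ===== Notes on version B (the rewrite author's own statement) =====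
-- stated objective: simpler
-- what changed: Replaces the stateful doubling accumulator (result=0/1/result*2 machine) with a single counting pass followed by the closed-form score 2**(count-1).
import Mathlib
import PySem

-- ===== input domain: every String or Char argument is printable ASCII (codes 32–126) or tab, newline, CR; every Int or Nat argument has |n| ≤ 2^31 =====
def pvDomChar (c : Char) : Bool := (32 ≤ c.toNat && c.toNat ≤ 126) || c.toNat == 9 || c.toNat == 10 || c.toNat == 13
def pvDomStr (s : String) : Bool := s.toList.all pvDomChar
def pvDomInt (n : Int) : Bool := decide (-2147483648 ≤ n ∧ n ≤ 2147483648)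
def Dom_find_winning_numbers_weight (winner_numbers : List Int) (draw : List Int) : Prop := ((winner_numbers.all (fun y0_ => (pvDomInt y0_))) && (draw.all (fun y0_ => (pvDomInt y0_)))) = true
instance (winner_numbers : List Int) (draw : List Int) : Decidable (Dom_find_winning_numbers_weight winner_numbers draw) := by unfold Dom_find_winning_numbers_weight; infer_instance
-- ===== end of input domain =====

-- B replaces A's stateful doubling accumulator with a count-then-closed-form (2^(count-1)) computation; objective: simpler.
-- ===== PORT A =====
def find_winning_numbers_weight (winner_numbers : List Int) (draw : List Int) : Int :=
  draw.foldl (fun result num =>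
    if num ∈ winner_numbers then
      (if result = 0 then 1 else result * 2)
    else result) 0

-- ===== PORT B =====
def find_winning_numbers_weight_alt (winner_numbers : List Int) (draw : List Int) : Int :=
  let count : Nat := (draw.filter (fun num => decide (num ∈ winner_numbers))).length
  if count = 0 then 0 else (2 : Int) ^ (count - 1)

-- ===== PRECONDITION & SPEC =====
def Spec_find_winning_numbers_weight (winner_numbers : List Int) (draw : List Int) (out : Int) : Prop := out = find_winning_numbers_weight_alt winner_numbers draw
instance (winner_numbers : List Int) (draw : List Int) (out : Int) : Decidable (Spec_find_winning_numbers_weight winner_numbers draw out) := by unfold Spec_find_winning_numbers_weight; infer_instance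

-- ===== CLAIM =====
def Claim_equal_find_winning_numbers_weight : Prop := ∀ (winner_numbers : List Int) (draw : List Int), Dom_find_winning_numbers_weight winner_numbers draw → Spec_find_winning_numbers_weight winner_numbers draw (find_winning_numbers_weight winner_numbers draw)

-- ===== LEMMAS AND PROOFS =====
theorem fwnw_loop_pos (w : List Int) (d : List Int) (r : Int) (hr : 0 < r) :
    d.foldl (fun result num =>
      if num ∈ w then (if result = 0 then 1 else result * 2) else result) r
    = r * (2 : Int) ^ (d.filter (fun num => decide (num ∈ w))).length := by
  induction d generalizing r with
  | nil => simp
  | cons a t ih =>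
    by_cases ha : a ∈ w
    · have hr0 : r ≠ 0 := ne_of_gt hr
      simp only [List.foldl_cons, List.filter_cons, ha, if_pos, decide_true]
      rw [if_neg hr0, ih (r * 2) (by positivity)]
      simp [pow_succ]; ring
    · simp only [List.foldl_cons, List.filter_cons, ha, decide_false]
      exact ih r hr

theorem fwnw_loop_zero (w : List Int) (d : List Int) :
    d.foldl (fun result num =>
      if num ∈ w then (if result = 0 then 1 else result * 2) else result) 0
    = find_winning_numbers_weight_alt w d := by
  induction d with
  | nil => simp [find_winning_numbers_weight_alt]
  | cons a t ih =>
    by_cases ha : a ∈ w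
    · simp only [List.foldl_cons, ha, if_pos]
      rw [fwnw_loop_pos w t 1 one_pos]
      simp [find_winning_numbers_weight_alt, ha]
    · simp only [List.foldl_cons, ha, if_neg, not_false_iff]
      rw [ih]
      simp [find_winning_numbers_weight_alt, ha]

-- ===== VERDICT =====
theorem find_winning_numbers_weight_spec : Claim_equal_find_winning_numbers_weight := by
  intro w d _
  unfold Spec_find_winning_numbers_weight find_winning_numbers_weight
  exact fwnw_loop_zero w d
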